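-- pv_equiv track=rewrite | github.com/tinnguyenhuuletrong/Learning | leetcode/others/longest_string_chain.py | is_predecessor
-- ===== SOURCE A (Python) =====
-- def is_predecessor(a: str, b:str) -> bool:
--     checkAt = 0
--     if a == b:
--         return False
--     if abs(len(a) - len(b)) >1:
--         return False
--
--     for i in range(len(a)):
--         is_ok = False
--         while checkAt < len(b):
--             if b[checkAt] == a[i]:
--                 checkAt+=1
--                 is_ok = True
--                 break
--             else:
--                 checkAt+=1
--         if not is_ok:
--             return False
--     return True
-- ===== SOURCE B (Python) =====
-- def is_predecessor(a: str, b: str) -> bool: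
--     if len(b) != len(a) + 1:
--         return False
--     return any(a == b[:i] + b[i+1:] for i in range(len(b)))
-- ===== Notes on version B (the rewrite author's own statement) =====
-- stated objective: idiomatic
-- what changed: Replaces A's stateful greedy one-pass subsequence scan (checkAt cursor plus a break-flag while loop) by a length guard len(b)==len(a)+1 and enumeration of all single-character deletions of b compared to a.
import Mathlib
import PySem

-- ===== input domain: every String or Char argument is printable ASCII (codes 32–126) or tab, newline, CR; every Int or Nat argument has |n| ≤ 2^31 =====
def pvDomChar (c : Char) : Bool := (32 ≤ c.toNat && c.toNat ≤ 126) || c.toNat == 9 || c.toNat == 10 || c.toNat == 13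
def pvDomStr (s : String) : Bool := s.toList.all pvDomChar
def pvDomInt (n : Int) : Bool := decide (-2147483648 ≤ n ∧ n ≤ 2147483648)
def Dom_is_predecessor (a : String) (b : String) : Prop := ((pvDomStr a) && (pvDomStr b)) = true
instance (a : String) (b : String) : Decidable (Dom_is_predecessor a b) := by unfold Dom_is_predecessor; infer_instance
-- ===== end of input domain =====

-- B replaces A's greedy one-pass subsequence scan by a length guard plus enumeration of
-- all single-character deletions of b (idiomatic; not faster).

-- ===== PORT A =====
-- inner `while checkAt < len(b)` loop of A: scan b from index checkAt for a match with c;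
-- `some k` = match found and cursor advanced to k (is_ok = True), `none` = b exhausted (is_ok = False)
def pvWhileA (b : List Char) (c : Char) (checkAt : Nat) : Option Nat :=
  if h : checkAt < b.length then
    if b[checkAt] == c then some (checkAt + 1) else pvWhileA b c (checkAt + 1)
  else none
termination_by b.length - checkAt

-- `for i in range(len(a))` loop of A, carrying the checkAt cursor
def pvForA (b : List Char) : List Char → Nat → Bool
  | [], _ => true
  | c :: rest, checkAt =>
    match pvWhileA b c checkAt with
    | some k => pvForA b rest k
    | none => false

def is_predecessor (a : String) (b : String) : Bool :=
  if a == b then false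
  else if ((a.toList.length : Int) - (b.toList.length : Int)).natAbs > 1 then false
  else pvForA b.toList a.toList 0

-- ===== PORT B =====
def is_predecessor_alt (a : String) (b : String) : Bool :=
  let la := a.toList
  let lb := b.toList
  if lb.length ≠ la.length + 1 then false
  else (List.range lb.length).any fun i =>
    la == PySem.List.slice lb none (some (i : Int)) ++ PySem.List.slice lb (some ((i : Int) + 1)) none

-- ===== PRECONDITION & SPEC =====
def Spec_is_predecessor (a : String) (b : String) (out : Bool) : Prop := out = is_predecessor_alt a b
instance (a : String) (b : String) (out : Bool) : Decidable (Spec_is_predecessor a b out) := by unfold Spec_is_predecessor; infer_instance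

-- ===== CLAIM (what is proved, stated in full; the proofs are below) =====
def Claim_equal_is_predecessor : Prop := ∀ (a : String) (b : String), Dom_is_predecessor a b → Spec_is_predecessor a b (is_predecessor a b)

-- ===== LEMMAS AND PROOFS =====

-- A's inner while loop implements one step of the greedy isSublist recursion on b.drop checkAt
lemma pvWhileA_spec (b : List Char) (c : Char) (as : List Char) (k : Nat) :
    (match pvWhileA b c k with
      | some k' => as.isSublist (b.drop k')
      | none => false) = (c :: as).isSublist (b.drop k) := by
  fun_induction pvWhileA b c k with
  | case1 k h hb =>
    have hcb : b[k] = c := beq_iff_eq.mp hb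
    rw [List.drop_eq_getElem_cons h]
    simp [List.isSublist, hcb]
  | case2 k h hb ih =>
    have hcb : (c == b[k]) = false := by
      cases e : c == b[k] with
      | true => exact absurd (beq_iff_eq.mp e).symm (by simpa using hb)
      | false => rfl
    rw [List.drop_eq_getElem_cons h]
    simp only [List.isSublist, hcb, Bool.false_eq_true, if_false]
    exact ih
  | case3 k h =>
    have hd : b.drop k = [] := List.drop_eq_nil_of_le (by omega)
    simp [hd, List.isSublist]

-- A's for-loop is the greedy subsequence test
lemma pvForA_spec (b : List Char) (as : List Char) : ∀ k, pvForA b as k = as.isSublist (b.drop k) := by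
  induction as with
  | nil => intro k; simp [pvForA, List.isSublist]
  | cons c rest ih =>
    intro k
    rw [← pvWhileA_spec b c rest k]
    cases h : pvWhileA b c k with
    | some k' => simp [pvForA, h, ih]
    | none => simp [pvForA, h]

-- a sublist one element shorter is a single-index deletion
lemma sublist_exists_eraseIdx (la lb : List Char) (h : la.Sublist lb)
    (hlen : lb.length = la.length + 1) : ∃ i < lb.length, lb.eraseIdx i = la := by
  induction h with
  | slnil => simp at hlen
  | cons x hs ih =>
    rename_i l₁ l₂
    have hl : l₁.length = l₂.length := by
      have := hs.length_le; simp at hlen; omega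
    have heq : l₁ = l₂ := hs.eq_of_length hl
    exact ⟨0, by simp, by simp [heq]⟩
  | cons₂ x hs ih =>
    rename_i l₁ l₂
    obtain ⟨i, hi, he⟩ := ih (by simpa using hlen)
    exact ⟨i + 1, by simpa using hi, by simp [List.eraseIdx_cons_succ, he]⟩

lemma alt_any_iff (la lb : List Char) :
    ((List.range lb.length).any fun i =>
      la == PySem.List.slice lb none (some (i : Int)) ++ PySem.List.slice lb (some ((i : Int) + 1)) none) = true
      ↔ ∃ i < lb.length, la = lb.eraseIdx i := by
  have hcast : ∀ i : Nat, ((i : Int) + 1) = ((i + 1 : Nat) : Int) := by intro i; push_cast; ring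
  constructor
  · rintro h
    simp only [List.any_eq_true, List.mem_range] at h
    obtain ⟨i, hi, he⟩ := h
    refine ⟨i, hi, ?_⟩
    rw [List.eraseIdx_eq_take_drop_succ]
    rw [hcast i, PySem.List.slice_to_natCast, PySem.List.slice_from_natCast] at he
    exact beq_iff_eq.mp he
  · rintro ⟨i, hi, he⟩
    simp only [List.any_eq_true, List.mem_range]
    refine ⟨i, hi, ?_⟩
    rw [hcast i, PySem.List.slice_to_natCast, PySem.List.slice_from_natCast, beq_iff_eq,
      ← List.eraseIdx_eq_take_drop_succ]
    exact he

-- ===== VERDICT (by name: the statement is the Claim_ definition above) =====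
theorem is_predecessor_spec : Claim_equal_is_predecessor := by
  intro a b _
  unfold Spec_is_predecessor
  by_cases hab : a = b
  · subst hab
    simp only [is_predecessor, is_predecessor_alt, beq_self_eq_true, if_true]
    rw [if_pos (by omega)]
  · have hab' : (a == b) = false := beq_eq_false_iff_ne.mpr hab
    have htl : a.toList ≠ b.toList := fun h => hab (String.toList_inj.mp h)
    simp only [is_predecessor, is_predecessor_alt, hab', Bool.false_eq_true, if_false]
    by_cases hd : ((a.toList.length : Int) - (b.toList.length : Int)).natAbs > 1
    · rw [if_pos hd, if_pos (by omega)]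
    · rw [if_neg hd, pvForA_spec, List.drop_zero]
      by_cases hlen : b.toList.length = a.toList.length + 1
      · rw [if_neg (not_not_intro hlen)]
        cases hsub : a.toList.isSublist b.toList with
        | true =>
          obtain ⟨i, hi, he⟩ :=
            sublist_exists_eraseIdx a.toList b.toList (List.isSublist_iff_sublist.mp hsub) hlen
          exact ((alt_any_iff a.toList b.toList).mpr ⟨i, hi, he.symm⟩).symm
        | false =>
          cases hany : (List.range b.toList.length).any _ with
          | true =>
            obtain ⟨i, _, he⟩ := (alt_any_iff a.toList b.toList).mp hany
            have hs : a.toList.Sublist b.toList := he ▸ List.eraseIdx_sublist b.toList i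
            rw [← List.isSublist_iff_sublist, hsub] at hs
            exact absurd hs (by simp)
          | false => rfl
      · -- lengths do not fit: A's subsequence scan must fail too
        rw [if_pos hlen]
        cases hsub : a.toList.isSublist b.toList with
        | false => rfl
        | true =>
          have hs := List.isSublist_iff_sublist.mp hsub
          have hle := hs.length_le
          have hl : a.toList.length = b.toList.length := by omega
          exact absurd (hs.eq_of_length hl) htl
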